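-- pv_equiv track=rewrite | github.com/revfactory/AI-for-University | output/fix_and_build_pdf.py | fix_colon_endings
-- ===== SOURCE A (Python) =====
-- def fix_colon_endings(text):
--     """':' 로 끝나는 문장에서 ':' 삭제 (코드블록 내부 제외)"""
--     lines = text.split('\n')
--     fixed = []
--     in_code_block = False
--
--     for line in lines:
--         stripped_check = line.strip()
--         if stripped_check.startswith('```'):
--             in_code_block = not in_code_block
--             fixed.append(line)
--             continue
--
--         if in_code_block:
--             fixed.append(line)
--             continue
--
--         stripped = line.rstrip()
--
--         # 테이블 행, 빈 줄, 마크다운 헤더, JSON/YAML 키:값은 건드리지 않음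
--         if not stripped or stripped.startswith('|') or stripped.startswith('#'):
--             fixed.append(line)
--             continue
--
--         # URL 패턴 (http: https:) 은 건드리지 않음
--         if stripped.endswith('http:') or stripped.endswith('https:'):
--             fixed.append(line)
--             continue
--
--         # ':' 로 끝나는 줄 → ':' 삭제
--         if stripped.endswith(':'):
--             # 들여쓰기 보존
--             indent = len(line) - len(line.lstrip())
--             line = line[:indent] + stripped[:-1]
--
--         fixed.append(line)
--
--     return '\n'.join(fixed)
-- ===== SOURCE B (Python) =====
-- def _is_fence(line):
--     return line.strip().startswith('```')
--
--
-- def _span_until_fence(lines):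
--     """Longest prefix without a fence line, and the remainder (fence first)."""
--     i = 0
--     while i < len(lines) and not _is_fence(lines[i]):
--         i += 1
--     return lines[:i], lines[i:]
--
--
-- def _fix_line(line):
--     stripped = line.rstrip()
--     if not stripped or stripped.startswith('|') or stripped.startswith('#'):
--         return line
--     if stripped.endswith('http:') or stripped.endswith('https:'):
--         return line
--     if stripped.endswith(':'):
--         indent = len(line) - len(line.lstrip())
--         return line[:indent] + stripped[:-1]
--     return line
--
--
-- def fix_colon_endings(text):
--     """':' 로 끝나는 문장에서 ':' 삭제 (코드블록 내부 제외)"""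
--     out = []
--     rest = text.split('\n')
--     while rest:
--         plain, rest = _span_until_fence(rest)
--         out += [_fix_line(l) for l in plain]
--         if not rest:
--             break
--         out.append(rest[0])                      # opening fence, unchanged
--         code, rest = _span_until_fence(rest[1:])
--         out += code                              # code region verbatim
--         if not rest:
--             break
--         out.append(rest[0])                      # closing fence, unchanged
--         rest = rest[1:]
--     return '\n'.join(out)
-- ===== Notes on version B (the rewrite author's own statement) =====
-- stated objective: alternative
-- what changed: A's single line loop threading an in_code_block boolean flag is replaced by an explicit region decomposition: a span helper repeatedly splits the line list at fence lines, colon-stripping is applied region-wise to the non-code regions and code regions are copied verbatim.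
import Mathlib
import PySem

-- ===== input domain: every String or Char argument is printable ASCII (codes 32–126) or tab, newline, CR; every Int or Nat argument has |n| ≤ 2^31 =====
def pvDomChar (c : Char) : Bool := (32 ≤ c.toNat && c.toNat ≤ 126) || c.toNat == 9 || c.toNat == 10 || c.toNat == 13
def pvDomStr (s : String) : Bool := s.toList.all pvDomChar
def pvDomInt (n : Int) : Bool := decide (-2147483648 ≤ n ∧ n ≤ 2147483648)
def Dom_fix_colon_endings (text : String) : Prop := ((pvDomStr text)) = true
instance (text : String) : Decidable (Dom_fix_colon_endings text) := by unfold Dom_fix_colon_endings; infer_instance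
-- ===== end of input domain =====

-- B replaces A's single loop threading an in-code-block flag by an explicit decomposition of the
-- line list into fence-delimited regions (alternative decomposition, same cost).

-- ===== PORT A =====
-- A's loop body, named so the fold can be reasoned about; it is A's code verbatim.
def pvStepA (st : List String × Bool) (line : String) : List String × Bool :=
  let fixed := st.1
  let in_code_block := st.2
  let stripped_check := PySem.Str.strip line
  if PySem.Str.startswith stripped_check "```" then
    (fixed ++ [line], !in_code_block)
  else if in_code_block then
    (fixed ++ [line], in_code_block)
  else
    let stripped := PySem.Str.rstrip line
    if PySem.Str.len stripped == 0 || PySem.Str.startswith stripped "|" ||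
        PySem.Str.startswith stripped "#" then
      (fixed ++ [line], in_code_block)
    else if PySem.Str.endswith stripped "http:" || PySem.Str.endswith stripped "https:" then
      (fixed ++ [line], in_code_block)
    else if PySem.Str.endswith stripped ":" then
      let indent : Int := PySem.Str.len line - PySem.Str.len (PySem.Str.lstrip line)
      -- 'line[:indent] + stripped[:-1]': each slice via PySem; '+' of two strings ported by hand
      -- as list concatenation of the code points (exact for Python str concatenation)
      (fixed ++ [String.ofList ((PySem.Str.slice line none (some indent)).toList ++
        (PySem.Str.slice stripped none (some (-1))).toList)], in_code_block)
    else
      (fixed ++ [line], in_code_block)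

def fix_colon_endings (text : String) : String :=
  -- text.split('\n'): sep ≠ "" so split? is always some; getD is exact here
  let lines := (PySem.Str.split? text "\n").getD []
  let res := lines.foldl pvStepA ([], false)
  PySem.Str.join "\n" res.1

-- ===== PORT B =====
def pvIsFence (line : String) : Bool :=
  PySem.Str.startswith (PySem.Str.strip line) "```"

def pvFixLine (line : String) : String :=
  let stripped := PySem.Str.rstrip line
  if PySem.Str.len stripped == 0 || PySem.Str.startswith stripped "|" ||
      PySem.Str.startswith stripped "#" then
    line
  else if PySem.Str.endswith stripped "http:" || PySem.Str.endswith stripped "https:" then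
    line
  else if PySem.Str.endswith stripped ":" then
    let indent : Int := PySem.Str.len line - PySem.Str.len (PySem.Str.lstrip line)
    String.ofList ((PySem.Str.slice line none (some indent)).toList ++
      (PySem.Str.slice stripped none (some (-1))).toList)
  else
    line

-- _span_until_fence: longest fence-free prefix and the remainder
def pvSpanFence : List String → List String × List String
  | [] => ([], [])
  | l :: ls =>
    if pvIsFence l then ([], l :: ls)
    else
      let p := pvSpanFence ls
      (l :: p.1, p.2)

theorem pvSpanFence_snd_length_le (ls : List String) :
    (pvSpanFence ls).2.length ≤ ls.length := by
  induction ls with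
  | nil => simp [pvSpanFence]
  | cons l ls ih =>
    simp only [pvSpanFence]
    split
    · simp
    · simpa using Nat.le_succ_of_le ih

-- the region loop of B's fix_colon_endings (while rest: ... with 'if not rest: break')
def pvBuild (rest : List String) : List String :=
  if rest = [] then []
  else
    let p := pvSpanFence rest
    let plainOut := p.1.map pvFixLine
    if hp : p.2 = [] then plainOut
    else
      let f := p.2.head hp
      let q := pvSpanFence p.2.tail
      if hq : q.2 = [] then plainOut ++ [f] ++ q.1
      else plainOut ++ [f] ++ q.1 ++ [q.2.head hq] ++ pvBuild q.2.tail
  termination_by rest.length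
  decreasing_by
    show (pvSpanFence (pvSpanFence rest).2.tail).2.tail.length < rest.length
    have h1 := pvSpanFence_snd_length_le rest
    have h2 := pvSpanFence_snd_length_le (pvSpanFence rest).2.tail
    have h4 : (pvSpanFence (pvSpanFence rest).2.tail).2.length ≠ 0 :=
      fun h => hq (List.eq_nil_of_length_eq_zero h)
    simp only [List.length_tail] at *
    omega

def fix_colon_endings_alt (text : String) : String :=
  -- text.split('\n'): sep ≠ "" so split? is always some; getD is exact here
  PySem.Str.join "\n" (pvBuild ((PySem.Str.split? text "\n").getD []))

-- ===== PRECONDITION & SPEC =====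
def Spec_fix_colon_endings (text : String) (out : String) : Prop := out = fix_colon_endings_alt text
instance (text : String) (out : String) : Decidable (Spec_fix_colon_endings text out) := by unfold Spec_fix_colon_endings; infer_instance

-- ===== CLAIM (what is proved, stated in full; the proofs are below) =====
def Claim_equal_fix_colon_endings : Prop := ∀ (text : String), Dom_fix_colon_endings text → Spec_fix_colon_endings text (fix_colon_endings text)

-- ===== LEMMAS AND PROOFS =====

-- what A's fold produces while the flag is 'true' (inside a code block)
def pvCode (lines : List String) : List String :=
  (pvSpanFence lines).1 ++
    (match (pvSpanFence lines).2 with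
     | [] => []
     | g :: r => g :: pvBuild r)

theorem pvStepA_fence (acc : List String) (b : Bool) (l : String) (h : pvIsFence l = true) :
    pvStepA (acc, b) l = (acc ++ [l], !b) := by
  simp only [pvIsFence] at h
  simp only [pvStepA]
  rw [h]
  simp

theorem pvStepA_code (acc : List String) (l : String) (h : pvIsFence l = false) :
    pvStepA (acc, true) l = (acc ++ [l], true) := by
  simp only [pvIsFence] at h
  simp only [pvStepA]
  rw [h]
  simp

theorem pvStepA_plain (acc : List String) (l : String) (h : pvIsFence l = false) :
    pvStepA (acc, false) l = (acc ++ [pvFixLine l], false) := by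
  simp only [pvIsFence] at h
  simp only [pvStepA, pvFixLine]
  rw [h]
  simp only [Bool.false_eq_true, if_false]
  split_ifs <;> rfl

theorem pvBuild_fence (l : String) (ls : List String) (h : pvIsFence l = true) :
    pvBuild (l :: ls) = l :: pvCode ls := by
  rw [pvBuild.eq_def, pvCode]
  cases hq : (pvSpanFence ls).2 with
  | nil => simp [pvSpanFence, h, hq]
  | cons g r => simp [pvSpanFence, h, hq]

theorem pvBuild_plain (l : String) (ls : List String) (h : pvIsFence l = false) :
    pvBuild (l :: ls) = pvFixLine l :: pvBuild ls := by
  have hs1 : (pvSpanFence (l :: ls)).1 = l :: (pvSpanFence ls).1 := by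
    simp [pvSpanFence, h]
  have hs2 : (pvSpanFence (l :: ls)).2 = (pvSpanFence ls).2 := by
    simp [pvSpanFence, h]
  cases ls with
  | nil =>
    rw [pvBuild.eq_def, pvBuild.eq_def]
    simp [pvSpanFence, h]
  | cons r0 rs =>
    conv_lhs => rw [pvBuild.eq_def]
    conv_rhs => rw [pvBuild.eq_def]
    simp only [hs1, hs2, List.cons_ne_nil, if_false, List.map_cons]
    split_ifs with hp hq
    · rfl
    · simp
    · simp

theorem pvCode_fence (l : String) (ls : List String) (h : pvIsFence l = true) :
    pvCode (l :: ls) = l :: pvBuild ls := by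
  have hs : pvSpanFence (l :: ls) = ([], l :: ls) := by simp [pvSpanFence, h]
  simp [pvCode, hs]

theorem pvCode_plain (l : String) (ls : List String) (h : pvIsFence l = false) :
    pvCode (l :: ls) = l :: pvCode ls := by
  simp only [pvCode, pvSpanFence, h, Bool.false_eq_true, if_false]
  cases hq : (pvSpanFence ls).2 with
  | nil => simp
  | cons g r => simp

theorem pvMain (lines : List String) : ∀ acc : List String,
    (lines.foldl pvStepA (acc, false)).1 = acc ++ pvBuild lines ∧
    (lines.foldl pvStepA (acc, true)).1 = acc ++ pvCode lines := by
  induction lines with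
  | nil => intro acc; rw [pvBuild.eq_def]; simp [pvCode, pvSpanFence]
  | cons l ls ih =>
    intro acc
    constructor
    · rw [List.foldl_cons]
      cases h : pvIsFence l with
      | true =>
        rw [pvStepA_fence acc false l h, pvBuild_fence l ls h]
        simpa using (ih (acc ++ [l])).2
      | false =>
        rw [pvStepA_plain acc l h, pvBuild_plain l ls h]
        simpa using (ih (acc ++ [pvFixLine l])).1
    · rw [List.foldl_cons]
      cases h : pvIsFence l with
      | true =>
        rw [pvStepA_fence acc true l h, pvCode_fence l ls h]
        simpa using (ih (acc ++ [l])).1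
      | false =>
        rw [pvStepA_code acc l h, pvCode_plain l ls h]
        simpa using (ih (acc ++ [l])).2

-- ===== VERDICT (by name: the statement is the Claim_ definition above) =====
theorem fix_colon_endings_spec : Claim_equal_fix_colon_endings := by
  intro text _
  unfold Spec_fix_colon_endings fix_colon_endings fix_colon_endings_alt
  have h := (pvMain ((PySem.Str.split? text "\n").getD []) []).1
  simp only [List.nil_append] at h
  exact congrArg (PySem.Str.join "\n") h
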